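-- pv_equiv track=rewrite | github.com/timothe-chaumont/circuit-diagram-datagen | scripts/data_generation/generate_circuits.py | get_horizontal_lines
-- ===== SOURCE A (Python) =====
-- def get_horizontal_lines(y_pos, horiz_spaces):
--     """
--     """
--     lines_list = []
--     # x starts at 0 and increases to the right
--     current_x_pos = 0
--     # for each segment (we go through each size)
--     for x_space in horiz_spaces:
--         start_x = current_x_pos
--         end_x = start_x + x_space
--
--         lines_list.append(
--             {"from": (start_x, y_pos), "to": (end_x, y_pos)}
--         )
--
--         # update the new starting point
--         current_x_pos = end_x
--
--     return lines_list
-- ===== SOURCE B (Python) =====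
-- def get_horizontal_lines(y_pos, horiz_spaces):
--     # Boundary table via prefix sums, then pair adjacent boundaries.
--     boundaries = [0]
--     for s in horiz_spaces:
--         boundaries.append(boundaries[-1] + s)
--     return [{"from": (a, y_pos), "to": (b, y_pos)}
--             for a, b in zip(boundaries, boundaries[1:])]
-- ===== Notes on version B (the rewrite author's own statement) =====
-- stated objective: alternative
-- what changed: B precomputes the boundary-position table (prefix sums) and builds each segment dict by zipping consecutive boundaries, instead of A's single loop carrying a running x accumulator while emitting dicts.
import Mathlib
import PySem

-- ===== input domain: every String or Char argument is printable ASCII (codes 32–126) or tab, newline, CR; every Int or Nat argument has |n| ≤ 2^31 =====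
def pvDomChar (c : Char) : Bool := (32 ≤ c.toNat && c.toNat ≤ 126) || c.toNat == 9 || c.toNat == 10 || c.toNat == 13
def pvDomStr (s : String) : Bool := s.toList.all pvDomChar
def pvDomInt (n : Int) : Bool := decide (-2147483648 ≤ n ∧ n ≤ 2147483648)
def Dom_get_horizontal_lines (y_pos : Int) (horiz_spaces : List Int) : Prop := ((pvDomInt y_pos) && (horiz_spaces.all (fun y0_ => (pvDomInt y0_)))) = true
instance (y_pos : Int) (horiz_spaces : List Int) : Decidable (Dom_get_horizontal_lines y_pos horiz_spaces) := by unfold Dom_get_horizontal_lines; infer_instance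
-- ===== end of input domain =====

-- B rebuilds the segments from a prefix-sum boundary table zipped with its tail, instead of A's running-accumulator loop (alternative decomposition).
-- ===== PORT A =====
-- loop over horiz_spaces carrying (lines_list, current_x_pos)
def get_horizontal_lines (y_pos : Int) (horiz_spaces : List Int) : List (List (String × Int × Int)) :=
  (horiz_spaces.foldl
    (fun (st : List (List (String × Int × Int)) × Int) (x_space : Int) =>
      (st.1 ++ [[("from", st.2, y_pos), ("to", st.2 + x_space, y_pos)]], st.2 + x_space))
    ([], 0)).1

-- ===== PORT B =====
-- boundaries = [0]; then each new boundary = last boundary + s (prefix sums)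
def pvBoundaries (x : Int) : List Int → List Int
  | [] => [x]
  | s :: rest => x :: pvBoundaries (x + s) rest

def get_horizontal_lines_alt (y_pos : Int) (horiz_spaces : List Int) : List (List (String × Int × Int)) :=
  let boundaries := pvBoundaries 0 horiz_spaces
  (boundaries.zip boundaries.tail).map
    (fun p => [("from", p.1, y_pos), ("to", p.2, y_pos)])

-- ===== PRECONDITION & SPEC =====
def Spec_get_horizontal_lines (y_pos : Int) (horiz_spaces : List Int) (out : List (List (String × Int × Int))) : Prop := out = get_horizontal_lines_alt y_pos horiz_spaces
instance (y_pos : Int) (horiz_spaces : List Int) (out : List (List (String × Int × Int))) : Decidable (Spec_get_horizontal_lines y_pos horiz_spaces out) := by unfold Spec_get_horizontal_lines; infer_instance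

-- ===== CLAIM (what is proved, stated in full; the proofs are below) =====
def Claim_equal_get_horizontal_lines : Prop := ∀ (y_pos : Int) (horiz_spaces : List Int), Dom_get_horizontal_lines y_pos horiz_spaces → Spec_get_horizontal_lines y_pos horiz_spaces (get_horizontal_lines y_pos horiz_spaces)

-- ===== LEMMAS AND PROOFS =====
lemma zip_boundaries (y : Int) (l : List Int) (x : Int) :
    ((pvBoundaries x l).zip (pvBoundaries x l).tail).map
      (fun p => [("from", p.1, y), ("to", p.2, y)]) =
    match l with
    | [] => []
    | s :: rest => [("from", x, y), ("to", x + s, y)] ::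
        ((pvBoundaries (x + s) rest).zip (pvBoundaries (x + s) rest).tail).map
          (fun p => [("from", p.1, y), ("to", p.2, y)]) := by
  cases l with
  | nil => simp [pvBoundaries]
  | cons s rest =>
    cases rest with
    | nil => simp [pvBoundaries]
    | cons t ts => simp [pvBoundaries]

lemma foldl_eq_zip (y : Int) :
    ∀ (hs : List Int) (acc : List (List (String × Int × Int))) (cur : Int),
    (hs.foldl
      (fun (st : List (List (String × Int × Int)) × Int) (x_space : Int) =>
        (st.1 ++ [[("from", st.2, y), ("to", st.2 + x_space, y)]], st.2 + x_space))
      (acc, cur)).1 =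
    acc ++ ((pvBoundaries cur hs).zip (pvBoundaries cur hs).tail).map
      (fun p => [("from", p.1, y), ("to", p.2, y)]) := by
  intro hs
  induction hs with
  | nil => intro acc cur; simp [pvBoundaries]
  | cons s rest ih =>
    intro acc cur
    rw [zip_boundaries]
    simp only [List.foldl_cons, ih]
    simp


-- ===== VERDICT (by name: the statement is the Claim_ definition above) =====
theorem get_horizontal_lines_spec : Claim_equal_get_horizontal_lines := by
  intro y hs _
  unfold Spec_get_horizontal_lines get_horizontal_lines get_horizontal_lines_alt
  simpa using foldl_eq_zip y hs [] 0
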